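-- pv_equiv track=rewrite | github.com/sergio-marti/qm3 | tools/autopar/autopar.py | guess_dihe
-- ===== SOURCE A (Python) =====
-- def guess_dihe( angl ):
-- 	dihe = []
-- 	for i in range( len( angl ) - 1 ):
-- 		for j in range( i + 1, len( angl ) ):
-- 			if( angl[i][1] == angl[j][0] and angl[i][2] == angl[j][1] ):
-- 				dihe.append( [ angl[i][0], angl[i][1], angl[i][2], angl[j][2] ] )
-- 			elif( angl[i][1] == angl[j][2] and angl[i][2] == angl[j][1] ):
-- 				dihe.append( [ angl[i][0], angl[i][1], angl[i][2], angl[j][0] ] )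
-- 			elif( angl[i][1] == angl[j][0] and angl[i][0] == angl[j][1] ):
-- 				dihe.append( [ angl[i][2], angl[i][1], angl[i][0], angl[j][2] ] )
-- 			elif( angl[i][1] == angl[j][2] and angl[i][0] == angl[j][1] ):
-- 				dihe.append( [ angl[i][2], angl[i][1], angl[i][0], angl[j][0] ] )
-- 	return( dihe )
-- ===== SOURCE B (Python) =====
-- def guess_dihe(angl):
--     # index angles by their (first,second) and (second,third) atom pairs,
--     # look up the candidate partners of each angle instead of scanning all pairs
--     head = {}
--     tail = {}
--     for j, a in enumerate(angl):
--         head.setdefault((a[0], a[1]), []).append(j)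
--         tail.setdefault((a[1], a[2]), []).append(j)
--     dihe = []
--     for i, a in enumerate(angl):
--         cand = set()
--         cand.update(head.get((a[1], a[2]), []))
--         cand.update(tail.get((a[2], a[1]), []))
--         cand.update(head.get((a[1], a[0]), []))
--         cand.update(tail.get((a[0], a[1]), []))
--         for j in sorted(x for x in cand if x > i):
--             b = angl[j]
--             if a[1] == b[0] and a[2] == b[1]:
--                 dihe.append([a[0], a[1], a[2], b[2]])
--             elif a[1] == b[2] and a[2] == b[1]:
--                 dihe.append([a[0], a[1], a[2], b[0]])
--             elif a[1] == b[0] and a[0] == b[1]: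
--                 dihe.append([a[2], a[1], a[0], b[2]])
--             elif a[1] == b[2] and a[0] == b[1]:
--                 dihe.append([a[2], a[1], a[0], b[0]])
--     return dihe
-- ===== Notes on version B (the rewrite author's own statement) =====
-- stated objective: alternative
-- what changed: Replaces A's all-pairs double scan with two hash indexes keyed by each angle's (first,second) and (second,third) atom pairs; each angle looks up only its candidate partners, re-applies the same priority chain, and emits them in increasing partner index order.
-- outside the precondition, e.g. on guess_dihe([[1]]): A returns [], B raises IndexError
import Mathlib
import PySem

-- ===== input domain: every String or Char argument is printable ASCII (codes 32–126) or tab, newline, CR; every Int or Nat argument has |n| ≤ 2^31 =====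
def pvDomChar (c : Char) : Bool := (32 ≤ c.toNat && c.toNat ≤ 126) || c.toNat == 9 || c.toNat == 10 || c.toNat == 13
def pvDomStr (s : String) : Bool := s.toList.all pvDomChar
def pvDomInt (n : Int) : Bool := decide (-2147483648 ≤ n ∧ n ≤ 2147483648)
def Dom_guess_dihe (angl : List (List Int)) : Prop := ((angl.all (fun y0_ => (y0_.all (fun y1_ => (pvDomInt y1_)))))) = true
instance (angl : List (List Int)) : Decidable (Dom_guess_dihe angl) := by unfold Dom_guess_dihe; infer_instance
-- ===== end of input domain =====

-- B replaces A's all-pairs double scan by two hash indexes on the angles' end pairs and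
-- per-angle candidate lookups (objective: alternative algorithm, same return value).

-- shared indexing helpers (Python's angl[i][k]; total via default, exact under Pre_)
def pvAt (xs : List Int) (k : Int) : Int := (PySem.List.pyGet? xs k).getD 0
def pvRowAt (angl : List (List Int)) (i : Int) : List Int := (PySem.List.pyGet? angl i).getD []

-- ===== PORT A =====
def guess_dihe (angl : List (List Int)) : List (List Int) :=
  (PySem.List.pyRange 0 ((angl.length : Int) - 1) 1).foldl (fun dihe i =>
    (PySem.List.pyRange (i + 1) (angl.length : Int) 1).foldl (fun dihe j =>
      if pvAt (pvRowAt angl i) 1 = pvAt (pvRowAt angl j) 0 ∧ pvAt (pvRowAt angl i) 2 = pvAt (pvRowAt angl j) 1 then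
        dihe ++ [[pvAt (pvRowAt angl i) 0, pvAt (pvRowAt angl i) 1, pvAt (pvRowAt angl i) 2, pvAt (pvRowAt angl j) 2]]
      else if pvAt (pvRowAt angl i) 1 = pvAt (pvRowAt angl j) 2 ∧ pvAt (pvRowAt angl i) 2 = pvAt (pvRowAt angl j) 1 then
        dihe ++ [[pvAt (pvRowAt angl i) 0, pvAt (pvRowAt angl i) 1, pvAt (pvRowAt angl i) 2, pvAt (pvRowAt angl j) 0]]
      else if pvAt (pvRowAt angl i) 1 = pvAt (pvRowAt angl j) 0 ∧ pvAt (pvRowAt angl i) 0 = pvAt (pvRowAt angl j) 1 then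
        dihe ++ [[pvAt (pvRowAt angl i) 2, pvAt (pvRowAt angl i) 1, pvAt (pvRowAt angl i) 0, pvAt (pvRowAt angl j) 2]]
      else if pvAt (pvRowAt angl i) 1 = pvAt (pvRowAt angl j) 2 ∧ pvAt (pvRowAt angl i) 0 = pvAt (pvRowAt angl j) 1 then
        dihe ++ [[pvAt (pvRowAt angl i) 2, pvAt (pvRowAt angl i) 1, pvAt (pvRowAt angl i) 0, pvAt (pvRowAt angl j) 0]]
      else dihe) dihe) []

-- ===== PORT B =====
-- head.setdefault((a[0],a[1]),[]).append(j)  /  tail.setdefault((a[1],a[2]),[]).append(j)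
def pvHead (angl : List (List Int)) : PySem.Dict (Int × Int) (List Int) :=
  (PySem.List.enumerate angl).foldl
    (fun d p => d.modify (pvAt p.2 0, pvAt p.2 1) [] (· ++ [p.1])) PySem.Dict.empty

def pvTail (angl : List (List Int)) : PySem.Dict (Int × Int) (List Int) :=
  (PySem.List.enumerate angl).foldl
    (fun d p => d.modify (pvAt p.2 1, pvAt p.2 2) [] (· ++ [p.1])) PySem.Dict.empty

-- cand = set(); cand.update(…) four times
def pvCand (angl : List (List Int)) (a : List Int) : PySem.Set Int :=
  PySem.Set.update (PySem.Set.update (PySem.Set.update (PySem.Set.update PySem.Set.empty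
    ((pvHead angl).getD (pvAt a 1, pvAt a 2) []))
    ((pvTail angl).getD (pvAt a 2, pvAt a 1) []))
    ((pvHead angl).getD (pvAt a 1, pvAt a 0) []))
    ((pvTail angl).getD (pvAt a 0, pvAt a 1) [])

-- sorted(x for x in cand if x > i)
def pvJs (angl : List (List Int)) (i : Int) (a : List Int) : List Int :=
  PySem.List.sorted ((pvCand angl a).filter (fun x => decide (i < x))) (fun x => x) false

def guess_dihe_alt (angl : List (List Int)) : List (List Int) :=
  (PySem.List.enumerate angl).foldl (fun dihe p =>
    (pvJs angl p.1 p.2).foldl (fun dihe j =>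
      if pvAt p.2 1 = pvAt (pvRowAt angl j) 0 ∧ pvAt p.2 2 = pvAt (pvRowAt angl j) 1 then
        dihe ++ [[pvAt p.2 0, pvAt p.2 1, pvAt p.2 2, pvAt (pvRowAt angl j) 2]]
      else if pvAt p.2 1 = pvAt (pvRowAt angl j) 2 ∧ pvAt p.2 2 = pvAt (pvRowAt angl j) 1 then
        dihe ++ [[pvAt p.2 0, pvAt p.2 1, pvAt p.2 2, pvAt (pvRowAt angl j) 0]]
      else if pvAt p.2 1 = pvAt (pvRowAt angl j) 0 ∧ pvAt p.2 0 = pvAt (pvRowAt angl j) 1 then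
        dihe ++ [[pvAt p.2 2, pvAt p.2 1, pvAt p.2 0, pvAt (pvRowAt angl j) 2]]
      else if pvAt p.2 1 = pvAt (pvRowAt angl j) 2 ∧ pvAt p.2 0 = pvAt (pvRowAt angl j) 1 then
        dihe ++ [[pvAt p.2 2, pvAt p.2 1, pvAt p.2 0, pvAt (pvRowAt angl j) 0]]
      else dihe) dihe) []

-- ===== PRECONDITION & SPEC =====
-- Pre_ excludes inputs with a row of fewer than 3 entries: on such inputs Python A raises
-- IndexError except in degenerate cases where its loops never touch the short row (e.g. the
-- excluded single-row cite below, where A returns the empty result but B raises building its index).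
def Pre_guess_dihe (angl : List (List Int)) : Prop := ∀ r ∈ angl, 3 ≤ r.length
instance (angl : List (List Int)) : Decidable (Pre_guess_dihe angl) := by unfold Pre_guess_dihe; infer_instance

def pvWitness_guess_dihe : List (List Int) := [[1, 2, 3], [2, 3, 4]]

def Spec_guess_dihe (angl : List (List Int)) (out : List (List Int)) : Prop := out = guess_dihe_alt angl
instance (angl : List (List Int)) (out : List (List Int)) : Decidable (Spec_guess_dihe angl out) := by unfold Spec_guess_dihe; infer_instance

-- ===== CLAIM (what is proved, stated in full; the proofs are below) =====
def Claim_equal_guess_dihe : Prop := ∀ (angl : List (List Int)), Dom_guess_dihe angl → Pre_guess_dihe angl → Spec_guess_dihe angl (guess_dihe angl)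

-- ===== LEMMAS AND PROOFS =====

-- the first matching branch of the shared elif chain, as an Option
def pvF (a b : List Int) : Option (List Int) :=
  if pvAt a 1 = pvAt b 0 ∧ pvAt a 2 = pvAt b 1 then some [pvAt a 0, pvAt a 1, pvAt a 2, pvAt b 2]
  else if pvAt a 1 = pvAt b 2 ∧ pvAt a 2 = pvAt b 1 then some [pvAt a 0, pvAt a 1, pvAt a 2, pvAt b 0]
  else if pvAt a 1 = pvAt b 0 ∧ pvAt a 0 = pvAt b 1 then some [pvAt a 2, pvAt a 1, pvAt a 0, pvAt b 2]
  else if pvAt a 1 = pvAt b 2 ∧ pvAt a 0 = pvAt b 1 then some [pvAt a 2, pvAt a 1, pvAt a 0, pvAt b 0]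
  else none

def pvG (angl : List (List Int)) (a : List Int) (j : Int) : List (List Int) :=
  (pvF a (pvRowAt angl j)).toList

lemma pv_chain_eq (angl : List (List Int)) (a : List Int) (dihe : List (List Int)) (j : Int) :
    (if pvAt a 1 = pvAt (pvRowAt angl j) 0 ∧ pvAt a 2 = pvAt (pvRowAt angl j) 1 then
        dihe ++ [[pvAt a 0, pvAt a 1, pvAt a 2, pvAt (pvRowAt angl j) 2]]
      else if pvAt a 1 = pvAt (pvRowAt angl j) 2 ∧ pvAt a 2 = pvAt (pvRowAt angl j) 1 then
        dihe ++ [[pvAt a 0, pvAt a 1, pvAt a 2, pvAt (pvRowAt angl j) 0]]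
      else if pvAt a 1 = pvAt (pvRowAt angl j) 0 ∧ pvAt a 0 = pvAt (pvRowAt angl j) 1 then
        dihe ++ [[pvAt a 2, pvAt a 1, pvAt a 0, pvAt (pvRowAt angl j) 2]]
      else if pvAt a 1 = pvAt (pvRowAt angl j) 2 ∧ pvAt a 0 = pvAt (pvRowAt angl j) 1 then
        dihe ++ [[pvAt a 2, pvAt a 1, pvAt a 0, pvAt (pvRowAt angl j) 0]]
      else dihe) = dihe ++ pvG angl a j := by
  unfold pvG pvF
  split_ifs <;> simp

lemma pv_inner_foldl (angl : List (List Int)) (a : List Int) (l : List Int) (dihe : List (List Int)) :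
    l.foldl (fun dihe j =>
      if pvAt a 1 = pvAt (pvRowAt angl j) 0 ∧ pvAt a 2 = pvAt (pvRowAt angl j) 1 then
        dihe ++ [[pvAt a 0, pvAt a 1, pvAt a 2, pvAt (pvRowAt angl j) 2]]
      else if pvAt a 1 = pvAt (pvRowAt angl j) 2 ∧ pvAt a 2 = pvAt (pvRowAt angl j) 1 then
        dihe ++ [[pvAt a 0, pvAt a 1, pvAt a 2, pvAt (pvRowAt angl j) 0]]
      else if pvAt a 1 = pvAt (pvRowAt angl j) 0 ∧ pvAt a 0 = pvAt (pvRowAt angl j) 1 then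
        dihe ++ [[pvAt a 2, pvAt a 1, pvAt a 0, pvAt (pvRowAt angl j) 2]]
      else if pvAt a 1 = pvAt (pvRowAt angl j) 2 ∧ pvAt a 0 = pvAt (pvRowAt angl j) 1 then
        dihe ++ [[pvAt a 2, pvAt a 1, pvAt a 0, pvAt (pvRowAt angl j) 0]]
      else dihe) dihe
    = dihe ++ l.flatMap (fun j => pvG angl a j) := by
  rw [show (fun (dihe : List (List Int)) (j : Int) =>
      if pvAt a 1 = pvAt (pvRowAt angl j) 0 ∧ pvAt a 2 = pvAt (pvRowAt angl j) 1 then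
        dihe ++ [[pvAt a 0, pvAt a 1, pvAt a 2, pvAt (pvRowAt angl j) 2]]
      else if pvAt a 1 = pvAt (pvRowAt angl j) 2 ∧ pvAt a 2 = pvAt (pvRowAt angl j) 1 then
        dihe ++ [[pvAt a 0, pvAt a 1, pvAt a 2, pvAt (pvRowAt angl j) 0]]
      else if pvAt a 1 = pvAt (pvRowAt angl j) 0 ∧ pvAt a 0 = pvAt (pvRowAt angl j) 1 then
        dihe ++ [[pvAt a 2, pvAt a 1, pvAt a 0, pvAt (pvRowAt angl j) 2]]
      else if pvAt a 1 = pvAt (pvRowAt angl j) 2 ∧ pvAt a 0 = pvAt (pvRowAt angl j) 1 then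
        dihe ++ [[pvAt a 2, pvAt a 1, pvAt a 0, pvAt (pvRowAt angl j) 0]]
      else dihe)
    = fun dihe j => dihe ++ pvG angl a j from
      funext fun dihe => funext fun j => pv_chain_eq angl a dihe j]
  exact PySem.List.foldl_append_eq_flatMap _ _ _

lemma pv_A_eq (angl : List (List Int)) :
    guess_dihe angl =
      (PySem.List.pyRange 0 ((angl.length : Int) - 1) 1).flatMap (fun i =>
        (PySem.List.pyRange (i + 1) (angl.length : Int) 1).flatMap (fun j =>
          pvG angl (pvRowAt angl i) j)) := by
  unfold guess_dihe
  simp only [pv_inner_foldl]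
  rw [PySem.List.foldl_append_eq_flatMap]
  simp

lemma pv_B_eq (angl : List (List Int)) :
    guess_dihe_alt angl =
      (PySem.List.enumerate angl).flatMap (fun p =>
        (pvJs angl p.1 p.2).flatMap (fun j => pvG angl p.2 j)) := by
  unfold guess_dihe_alt
  simp only [pv_inner_foldl]
  rw [PySem.List.foldl_append_eq_flatMap]
  simp

lemma pv_rowAt_natCast (angl : List (List Int)) (k : Nat) (h : k < angl.length) :
    pvRowAt angl (k : Int) = angl[k] := by
  unfold pvRowAt
  rw [PySem.List.pyGet?_natCast]
  simp [List.getElem?_eq_getElem h]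

lemma pv_mem_headGetD (angl : List (List Int)) (c : Int × Int) (j : Int) :
    j ∈ (pvHead angl).getD c [] ↔
      0 ≤ j ∧ j < (angl.length : Int) ∧ (pvAt (pvRowAt angl j) 0, pvAt (pvRowAt angl j) 1) = c := by
  unfold pvHead
  rw [show (PySem.List.enumerate angl).foldl
        (fun d p => d.modify (pvAt p.2 0, pvAt p.2 1) [] (· ++ [p.1])) PySem.Dict.empty
      = ((PySem.List.enumerate angl).map (fun p => ((pvAt p.2 0, pvAt p.2 1), p.1))).foldl
          (fun d q => d.modify q.1 [] (· ++ [q.2])) PySem.Dict.empty from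
      (List.foldl_map (f := fun (p : Int × List Int) => ((pvAt p.2 0, pvAt p.2 1), p.1))
        (g := fun (d : PySem.Dict (Int × Int) (List Int)) (q : (Int × Int) × Int) => d.modify q.1 [] (· ++ [q.2]))
        (l := PySem.List.enumerate angl) (init := PySem.Dict.empty)).symm]
  rw [PySem.Dict.getD_foldl_modify_append]
  simp only [PySem.Dict.getD_empty, List.nil_append, List.filter_map, List.map_map,
    List.mem_map, List.mem_filter, Function.comp_apply, PySem.List.mem_enumerate_iff]
  constructor
  · rintro ⟨p, ⟨⟨k, hk, rfl⟩, hc⟩, rfl⟩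
    simp only [zero_add] at hc ⊢
    refine ⟨by positivity, by exact_mod_cast hk, ?_⟩
    rw [pv_rowAt_natCast angl k hk]
    simpa using hc
  · rintro ⟨h0, hn, hc⟩
    refine ⟨((j : Int), angl[j.toNat]'(by omega)), ⟨⟨j.toNat, by omega, by simp [Int.toNat_of_nonneg h0]⟩, ?_⟩, rfl⟩
    have hrow : pvRowAt angl j = angl[j.toNat]'(by omega) := by
      have := pv_rowAt_natCast angl j.toNat (by omega)
      rwa [Int.toNat_of_nonneg h0] at this
    rw [hrow] at hc
    simpa using hc

lemma pv_mem_tailGetD (angl : List (List Int)) (c : Int × Int) (j : Int) :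
    j ∈ (pvTail angl).getD c [] ↔
      0 ≤ j ∧ j < (angl.length : Int) ∧ (pvAt (pvRowAt angl j) 1, pvAt (pvRowAt angl j) 2) = c := by
  unfold pvTail
  rw [show (PySem.List.enumerate angl).foldl
        (fun d p => d.modify (pvAt p.2 1, pvAt p.2 2) [] (· ++ [p.1])) PySem.Dict.empty
      = ((PySem.List.enumerate angl).map (fun p => ((pvAt p.2 1, pvAt p.2 2), p.1))).foldl
          (fun d q => d.modify q.1 [] (· ++ [q.2])) PySem.Dict.empty from
      (List.foldl_map (f := fun (p : Int × List Int) => ((pvAt p.2 1, pvAt p.2 2), p.1))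
        (g := fun (d : PySem.Dict (Int × Int) (List Int)) (q : (Int × Int) × Int) => d.modify q.1 [] (· ++ [q.2]))
        (l := PySem.List.enumerate angl) (init := PySem.Dict.empty)).symm]
  rw [PySem.Dict.getD_foldl_modify_append]
  simp only [PySem.Dict.getD_empty, List.nil_append, List.filter_map, List.map_map,
    List.mem_map, List.mem_filter, Function.comp_apply, PySem.List.mem_enumerate_iff]
  constructor
  · rintro ⟨p, ⟨⟨k, hk, rfl⟩, hc⟩, rfl⟩
    simp only [zero_add] at hc ⊢
    refine ⟨by positivity, by exact_mod_cast hk, ?_⟩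
    rw [pv_rowAt_natCast angl k hk]
    simpa using hc
  · rintro ⟨h0, hn, hc⟩
    refine ⟨((j : Int), angl[j.toNat]'(by omega)), ⟨⟨j.toNat, by omega, by simp [Int.toNat_of_nonneg h0]⟩, ?_⟩, rfl⟩
    have hrow : pvRowAt angl j = angl[j.toNat]'(by omega) := by
      have := pv_rowAt_natCast angl j.toNat (by omega)
      rwa [Int.toNat_of_nonneg h0] at this
    rw [hrow] at hc
    simpa using hc

lemma pv_isSome_pvF (a b : List Int) :
    (pvF a b).isSome = true ↔
      ((pvAt a 1 = pvAt b 0 ∧ pvAt a 2 = pvAt b 1) ∨ (pvAt a 1 = pvAt b 2 ∧ pvAt a 2 = pvAt b 1) ∨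
       (pvAt a 1 = pvAt b 0 ∧ pvAt a 0 = pvAt b 1) ∨ (pvAt a 1 = pvAt b 2 ∧ pvAt a 0 = pvAt b 1)) := by
  unfold pvF; split_ifs <;> simp_all

lemma pv_mem_cand (angl : List (List Int)) (a : List Int) (j : Int) :
    j ∈ pvCand angl a ↔
      0 ≤ j ∧ j < (angl.length : Int) ∧ (pvF a (pvRowAt angl j)).isSome = true := by
  unfold pvCand
  rw [PySem.Set.mem_update, PySem.Set.mem_update, PySem.Set.mem_update, PySem.Set.mem_update]
  simp only [pv_mem_headGetD, pv_mem_tailGetD, Prod.mk.injEq]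
  have hemp : ¬ (j ∈ (PySem.Set.empty : PySem.Set Int)) := List.not_mem_nil
  constructor
  · rintro ((((h | ⟨h0, hn, h1, h2⟩) | ⟨h0, hn, h1, h2⟩) | ⟨h0, hn, h1, h2⟩) | ⟨h0, hn, h1, h2⟩)
    · exact absurd h hemp
    · exact ⟨h0, hn, (pv_isSome_pvF a _).mpr (Or.inl ⟨h1.symm, h2.symm⟩)⟩
    · exact ⟨h0, hn, (pv_isSome_pvF a _).mpr (Or.inr (Or.inl ⟨h2.symm, h1.symm⟩))⟩
    · exact ⟨h0, hn, (pv_isSome_pvF a _).mpr (Or.inr (Or.inr (Or.inl ⟨h1.symm, h2.symm⟩)))⟩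
    · exact ⟨h0, hn, (pv_isSome_pvF a _).mpr (Or.inr (Or.inr (Or.inr ⟨h2.symm, h1.symm⟩)))⟩
  · rintro ⟨h0, hn, hs⟩
    rcases (pv_isSome_pvF a _).mp hs with ⟨h1, h2⟩ | ⟨h1, h2⟩ | ⟨h1, h2⟩ | ⟨h1, h2⟩
    · exact Or.inl (Or.inl (Or.inl (Or.inr ⟨h0, hn, h1.symm, h2.symm⟩)))
    · exact Or.inl (Or.inl (Or.inr ⟨h0, hn, h2.symm, h1.symm⟩))
    · exact Or.inl (Or.inr ⟨h0, hn, h1.symm, h2.symm⟩)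
    · exact Or.inr ⟨h0, hn, h2.symm, h1.symm⟩

lemma pv_nodup_cand (angl : List (List Int)) (a : List Int) : (pvCand angl a).Nodup := by
  unfold pvCand
  exact PySem.Set.nodup_update _ _ (PySem.Set.nodup_update _ _ (PySem.Set.nodup_update _ _
    (PySem.Set.nodup_update _ _ List.nodup_nil)))

lemma pv_js_eq (angl : List (List Int)) (i : Int) (a : List Int) (h0 : 0 ≤ i) :
    pvJs angl i a =
      (PySem.List.pyRange (i + 1) (angl.length : Int) 1).filter
        (fun j => (pvF a (pvRowAt angl j)).isSome) := by
  unfold pvJs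
  have hnd1 : (PySem.List.sorted ((pvCand angl a).filter (fun x => decide (i < x))) (fun x => x) false).Nodup :=
    (PySem.List.sorted_perm _ _ _).nodup_iff.mpr ((pv_nodup_cand angl a).filter _)
  have hnd2 : ((PySem.List.pyRange (i + 1) (angl.length : Int) 1).filter
      (fun j => (pvF a (pvRowAt angl j)).isSome)).Nodup :=
    (PySem.List.nodup_pyRange_one _ _).filter _
  have hmem : ∀ x, x ∈ PySem.List.sorted ((pvCand angl a).filter (fun x => decide (i < x))) (fun x => x) false ↔
      x ∈ (PySem.List.pyRange (i + 1) (angl.length : Int) 1).filter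
        (fun j => (pvF a (pvRowAt angl j)).isSome) := by
    intro x
    rw [PySem.List.mem_sorted]
    simp only [List.mem_filter, pv_mem_cand, PySem.List.mem_pyRange_one, decide_eq_true_eq]
    constructor
    · rintro ⟨⟨hx0, hxn, hs⟩, hix⟩
      exact ⟨⟨by omega, hxn⟩, hs⟩
    · rintro ⟨⟨hx1, hxn⟩, hs⟩
      exact ⟨⟨by omega, hxn, hs⟩, by omega⟩
  refine List.Perm.eq_of_pairwise (le := (· ≤ ·)) (fun a b _ _ hab hba => le_antisymm hab hba)
    ?_ ?_ ((List.perm_ext_iff_of_nodup hnd1 hnd2).mpr hmem)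
  · simpa using PySem.List.sorted_pairwise ((pvCand angl a).filter (fun x => decide (i < x))) (fun x => x)
  · exact (PySem.List.pairwise_lt_pyRange_one _ _).filter _ |>.imp (fun h => le_of_lt h)

lemma pv_flatMap_filter (l : List Int) (p : Int → Bool) (g : Int → List (List Int))
    (h : ∀ x ∈ l, p x = false → g x = []) :
    (l.filter p).flatMap g = l.flatMap g := by
  induction l with
  | nil => rfl
  | cons x t ih =>
      by_cases hx : p x = true
      · simp [hx, ih (fun y hy => h y (List.mem_cons_of_mem _ hy))]
      · have hx' : p x = false := by simpa using hx
        simp [hx', h x (List.mem_cons_self) hx',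
          ih (fun y hy => h y (List.mem_cons_of_mem _ hy))]

-- ===== VERDICT (by name: the statement is the Claim_ definition above) =====
lemma pv_main (angl : List (List Int)) : guess_dihe angl = guess_dihe_alt angl := by
  rw [pv_A_eq, pv_B_eq]
  rw [PySem.List.enumerate_eq_map_pyRange angl [], List.flatMap_map]
  have hinner : ∀ i ∈ PySem.List.pyRange 0 (PySem.List.len angl) 1,
      (fun x => (pvJs angl (x, PySem.List.pyGetD angl x []).1 (x, PySem.List.pyGetD angl x []).2).flatMap
        (fun j => pvG angl (x, PySem.List.pyGetD angl x []).2 j)) i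
      = (fun i => (PySem.List.pyRange (i + 1) (angl.length : Int) 1).flatMap
          (fun j => pvG angl (pvRowAt angl i) j)) i := by
    intro i hi
    have h0 : 0 ≤ i := by
      exact ((PySem.List.mem_pyRange_one).mp hi).1
    have hrow : PySem.List.pyGetD angl i [] = pvRowAt angl i := rfl
    simp only [hrow]
    rw [pv_js_eq angl i (pvRowAt angl i) h0]
    apply pv_flatMap_filter
    intro x _ hx
    unfold pvG
    rcases hF : pvF (pvRowAt angl i) (pvRowAt angl x) with _ | v
    · rfl
    · rw [hF] at hx; simp at hx
  rw [List.flatMap_congr hinner]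
  rcases Nat.eq_zero_or_pos angl.length with h0 | h0
  · simp only [h0, Nat.cast_zero, PySem.List.len_eq]
    rw [PySem.List.pyRange_one_eq_nil (by omega), PySem.List.pyRange_one_eq_nil (by simp)]
  · have hsplit : PySem.List.pyRange 0 (PySem.List.len angl) 1
        = PySem.List.pyRange 0 ((angl.length : Int) - 1) 1 ++ [(angl.length : Int) - 1] := by
      have h := PySem.List.pyRange_one_succ_right (a := 0) (b := (angl.length : Int) - 1) (by omega)
      rw [sub_add_cancel] at h
      simpa [PySem.List.len_eq] using h
    rw [hsplit, List.flatMap_append]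
    have hlast : ((angl.length : Int) - 1 + 1) = (angl.length : Int) := by ring
    simp only [List.flatMap_cons, List.flatMap_nil, hlast,
      PySem.List.pyRange_one_eq_nil (le_refl ((angl.length : Int)))]
    simp

-- ===== VERDICT (by name: the statement is the Claim_ definition above) =====
-- ===== VERDICT (by name: the statement is the Claim_ definition above) =====
theorem guess_dihe_spec : Claim_equal_guess_dihe := by
  intro angl _ _
  unfold Spec_guess_dihe
  exact pv_main angl
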